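-- pv_equiv track=rewrite | github.com/arnavRai10/CS313E | Int_Practice.py | sort_by_interval_size
-- ===== SOURCE A (Python) =====
-- def sort_by_interval_size (tuples_list):
--     newList = []
--     while tuples_list:
--         minimum = tuples_list[0] #arbitrary num in list
--         for x in tuples_list:
--             if abs(x[1]-x[0]) < abs(minimum[0] - minimum[1]):
--                 minimum = x
--             if abs(x[1]-x[0]) == abs(minimum[0] - minimum[1]):
--                 if x[0] < minimum[0]:
--                     minimum = x
--                 if minimum[0] < x[0]:
--                     continue
--         newList.append(minimum)
--         tuples_list.remove(minimum)
--
--     return newList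
-- ===== SOURCE B (Python) =====
-- # Insertion sort: drain the input list from the front (emptying it like A does) and
-- # insert each tuple into the sorted result after all elements with key <= its key,
-- # key = (abs(b - a), a).  Return value proved equal to A's; both empty the argument.
-- def sort_by_interval_size(tuples_list):
--     result = []
--     while tuples_list:
--         x = tuples_list.pop(0)
--         kx = (abs(x[1] - x[0]), x[0])
--         i = 0
--         while i < len(result) and not kx < (abs(result[i][1] - result[i][0]), result[i][0]):
--             i += 1
--         result = result[:i] + [x] + result[i:]
--     return result
-- ===== Notes on version B (the rewrite author's own statement) =====
-- stated objective: alternative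
-- what changed: Replaced A's selection sort (rescan the remaining list for the first minimum of the key (|b-a|, a), append it and remove it) by an insertion sort that pops elements off the front and inserts each after all already-placed elements with key <= its key; both drain the argument list in place.
import Mathlib
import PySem

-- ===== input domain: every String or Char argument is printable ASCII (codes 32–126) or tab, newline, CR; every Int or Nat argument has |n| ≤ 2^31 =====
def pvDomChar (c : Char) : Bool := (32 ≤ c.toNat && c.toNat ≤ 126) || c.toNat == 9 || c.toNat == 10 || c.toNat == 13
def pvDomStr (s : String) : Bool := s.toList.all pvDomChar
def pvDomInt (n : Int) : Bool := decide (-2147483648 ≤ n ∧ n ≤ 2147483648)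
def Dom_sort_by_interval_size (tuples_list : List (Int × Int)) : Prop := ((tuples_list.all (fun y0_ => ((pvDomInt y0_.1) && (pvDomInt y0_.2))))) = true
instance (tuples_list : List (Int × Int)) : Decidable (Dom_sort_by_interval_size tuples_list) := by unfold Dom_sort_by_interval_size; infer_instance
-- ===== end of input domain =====

-- B replaces A's selection sort by an insertion sort on the same key (|b-a|, a); equal
-- return value proved below (both Pythons also drain the argument list in place).

-- ===== PORT A =====
-- one pass of A's inner `for x in tuples_list` body: update `minimum` given x
def pvSelStep (m x : Int × Int) : Int × Int :=
  let m1 := if |x.2 - x.1| < |m.1 - m.2| then x else m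
  -- `if minimum[0] < x[0]: continue` is a no-op (last statement of the loop body)
  if |x.2 - x.1| = |m1.1 - m1.2| then (if x.1 < m1.1 then x else m1) else m1

-- A's `while tuples_list:` loop; fuel = initial length (each pass removes one element)
def pvLoopA : Nat → List (Int × Int) → List (Int × Int)
  | _, [] => []
  | 0, _ :: _ => []   -- fuel is never exhausted
  | fuel + 1, x0 :: xs =>
      let m := (x0 :: xs).foldl pvSelStep x0     -- minimum = tuples_list[0]; for x in …
      m :: pvLoopA fuel ((PySem.List.remove? (x0 :: xs) m).getD [])   -- remove always succeeds

def sort_by_interval_size (tuples_list : List (Int × Int)) : List (Int × Int) :=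
  pvLoopA tuples_list.length tuples_list

-- ===== PORT B =====
-- kx = (abs(x[1]-x[0]), x[0])
def pvKey (p : Int × Int) : Int × Int := (|p.2 - p.1|, p.1)
-- Python `<` on int pairs (lexicographic)
def pvLt (a b : Int × Int) : Bool := a.1 < b.1 || (a.1 == b.1 && a.2 < b.2)

-- Source B's inner `while i < len(result) and not kx < (…)` scan: the insertion index
def pvFindIdx (kx : Int × Int) : List (Int × Int) → Nat
  | [] => 0
  | y :: res => if pvLt kx (pvKey y) then 0 else pvFindIdx kx res + 1

-- Source B's `result[:i] + [x] + result[i:]`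
def pvInsert (x kx : Int × Int) (res : List (Int × Int)) : List (Int × Int) :=
  res.take (pvFindIdx kx res) ++ x :: res.drop (pvFindIdx kx res)

-- Source B's while/pop(0) loop is a left fold over the list
def sort_by_interval_size_alt (tuples_list : List (Int × Int)) : List (Int × Int) :=
  tuples_list.foldl (fun result x => pvInsert x (pvKey x) result) []

-- ===== PRECONDITION & SPEC =====
def Spec_sort_by_interval_size (tuples_list : List (Int × Int)) (out : List (Int × Int)) : Prop := out = sort_by_interval_size_alt tuples_list
instance (tuples_list : List (Int × Int)) (out : List (Int × Int)) : Decidable (Spec_sort_by_interval_size tuples_list out) := by unfold Spec_sort_by_interval_size; infer_instance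

-- ===== CLAIM (what is proved, stated in full; the proofs are below) =====
def Claim_equal_sort_by_interval_size : Prop := ∀ (tuples_list : List (Int × Int)), Dom_sort_by_interval_size tuples_list → Spec_sort_by_interval_size tuples_list (sort_by_interval_size tuples_list)

-- ===== LEMMAS AND PROOFS =====

lemma pvLt_irrefl (a : Int × Int) : pvLt a a = false := by
  simp [pvLt]

lemma pvLt_trans {a b c : Int × Int} (h1 : pvLt a b = true) (h2 : pvLt b c = true) :
    pvLt a c = true := by
  simp only [pvLt, Bool.or_eq_true, Bool.and_eq_true, decide_eq_true_eq, beq_iff_eq] at *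
  omega

lemma pvLt_of_lt_of_not_lt {a b c : Int × Int} (h1 : pvLt a b = true)
    (h2 : pvLt c b = false) : pvLt a c = true := by
  simp only [pvLt, Bool.or_eq_true, Bool.and_eq_true, decide_eq_true_eq, beq_iff_eq,
    Bool.or_eq_false_iff, Bool.and_eq_false_iff, decide_eq_false_iff_not, beq_eq_false_iff_ne] at *
  omega

-- A's loop body updates `minimum` exactly when the new key is lexicographically smaller
lemma pvSelStep_eq (m x : Int × Int) :
    pvSelStep m x = if pvLt (pvKey x) (pvKey m) then x else m := by
  have hm : |m.1 - m.2| = |m.2 - m.1| := abs_sub_comm _ _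
  have hx : |x.1 - x.2| = |x.2 - x.1| := abs_sub_comm _ _
  simp only [pvSelStep, pvKey, pvLt]
  split_ifs with h1 h2 h3 h4 h5 <;> (try simp_all) <;>
    first
      | rfl
      | omega

-- the inner for-loop selects the FIRST element of m0 :: ys with minimal key
lemma pvFoldMin (ys : List (Int × Int)) (m0 : Int × Int) :
    ∃ p s, m0 :: ys = p ++ (ys.foldl pvSelStep m0) :: s ∧
      (ys.foldl pvSelStep m0 = m0 ∨ pvLt (pvKey (ys.foldl pvSelStep m0)) (pvKey m0) = true) ∧
      (∀ y ∈ p, pvLt (pvKey (ys.foldl pvSelStep m0)) (pvKey y) = true) ∧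
      (∀ y ∈ s, pvLt (pvKey y) (pvKey (ys.foldl pvSelStep m0)) = false) := by
  induction ys generalizing m0 with
  | nil => exact ⟨[], [], rfl, Or.inl rfl, by simp, by simp⟩
  | cons y ys ih =>
    rw [List.foldl_cons, pvSelStep_eq]
    by_cases h : pvLt (pvKey y) (pvKey m0) = true
    · rw [if_pos h]
      obtain ⟨p, s, heq, hd, hp, hs⟩ := ih y
      refine ⟨m0 :: p, s, by rw [List.cons_append, ← heq], ?_, ?_, hs⟩
      · right
        rcases hd with he | hlt
        · rw [he]; exact h
        · exact pvLt_trans hlt h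
      · intro z hz
        rcases List.mem_cons.mp hz with rfl | hz'
        · rcases hd with he | hlt
          · rw [he]; exact h
          · exact pvLt_trans hlt h
        · exact hp z hz'
    · rw [if_neg h]
      obtain ⟨p, s, heq, hd, hp, hs⟩ := ih m0
      match p, heq with
      | [], heq =>
        simp only [List.nil_append, List.cons.injEq] at heq
        obtain ⟨he, hs'⟩ := heq
        refine ⟨[], y :: ys, by rw [List.nil_append, ← he], hd, by simp, ?_⟩
        intro z hz
        rcases List.mem_cons.mp hz with rfl | hz'
        · rw [← he]; exact Bool.eq_false_iff.mpr h
        · rw [hs'] at hz'; exact hs z hz'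
      | a :: p', heq =>
        simp only [List.cons_append, List.cons.injEq] at heq
        obtain ⟨rfl, hys⟩ := heq
        have hm0 : pvLt (pvKey (ys.foldl pvSelStep m0)) (pvKey m0) = true :=
          hp m0 (List.mem_cons_self ..)
        refine ⟨m0 :: y :: p', s, ?_, hd, ?_, hs⟩
        · conv_lhs => rw [hys]
          simp
        intro z hz
        rcases List.mem_cons.mp hz with rfl | hz'
        · exact hm0
        rcases List.mem_cons.mp hz' with rfl | hz''
        · exact pvLt_of_lt_of_not_lt hm0 (Bool.eq_false_iff.mpr h)
        · exact hp z (List.mem_cons_of_mem _ hz'')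

lemma pvRemove_split (p s : List (Int × Int)) (m : Int × Int) (hp : ∀ y ∈ p, y ≠ m) :
    PySem.List.remove? (p ++ m :: s) m = some (p ++ s) := by
  induction p with
  | nil => simp
  | cons a p' ih =>
    rw [List.cons_append, PySem.List.remove?_cons_of_ne _ (hp a (List.mem_cons_self ..)),
      ih (fun y hy => hp y (List.mem_cons_of_mem _ hy))]
    simp

lemma mem_pvInsert {z x kx : Int × Int} {res : List (Int × Int)}
    (h : z ∈ pvInsert x kx res) : z = x ∨ z ∈ res := by
  rcases List.mem_append.mp h with h' | h'
  · exact Or.inr (List.mem_of_mem_take h')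
  · rcases List.mem_cons.mp h' with rfl | h''
    · exact Or.inl rfl
    · exact Or.inr (List.mem_of_mem_drop h'')

lemma mem_foldl_pvInsert {z : Int × Int} :
    ∀ (l : List (Int × Int)) (acc : List (Int × Int)),
      z ∈ l.foldl (fun result x => pvInsert x (pvKey x) result) acc → z ∈ acc ∨ z ∈ l := by
  intro l
  induction l with
  | nil => exact fun acc h => Or.inl h
  | cons x xs ih =>
    intro acc h
    rcases ih _ h with h' | h'
    · rcases mem_pvInsert h' with rfl | h''
      · exact Or.inr (List.mem_cons_self ..)
      · exact Or.inl h''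
    · exact Or.inr (List.mem_cons_of_mem _ h')

lemma pvFindIdx_cons (kx y : Int × Int) (res : List (Int × Int)) :
    pvFindIdx kx (y :: res) = if pvLt kx (pvKey y) then 0 else pvFindIdx kx res + 1 := rfl

lemma pvInsert_front (x kx : Int × Int) (acc : List (Int × Int))
    (h : ∀ y ∈ acc, pvLt kx (pvKey y) = true) : pvInsert x kx acc = x :: acc := by
  cases acc with
  | nil => rfl
  | cons y ys =>
    unfold pvInsert
    rw [pvFindIdx_cons, if_pos (h y (List.mem_cons_self ..))]
    simp

lemma foldl_pvInsert_skip (m : Int × Int) :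
    ∀ (s : List (Int × Int)) (acc : List (Int × Int)),
      (∀ y ∈ s, pvLt (pvKey y) (pvKey m) = false) →
      s.foldl (fun result x => pvInsert x (pvKey x) result) (m :: acc) =
        m :: s.foldl (fun result x => pvInsert x (pvKey x) result) acc := by
  intro s
  induction s with
  | nil => intro acc _; rfl
  | cons x xs ih =>
    intro acc hs
    have hstep : pvInsert x (pvKey x) (m :: acc) = m :: pvInsert x (pvKey x) acc := by
      unfold pvInsert
      rw [pvFindIdx_cons, if_neg (by rw [hs x (List.mem_cons_self ..)]; exact Bool.false_ne_true)]
      simp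
    rw [List.foldl_cons, List.foldl_cons, hstep,
      ih _ (fun y hy => hs y (List.mem_cons_of_mem _ hy))]

-- B pulls the first minimal-key element to the front: alt (p ++ m :: s) = m :: alt (p ++ s)
lemma pvAlt_split (p s : List (Int × Int)) (m : Int × Int)
    (hp : ∀ y ∈ p, pvLt (pvKey m) (pvKey y) = true)
    (hs : ∀ y ∈ s, pvLt (pvKey y) (pvKey m) = false) :
    sort_by_interval_size_alt (p ++ m :: s) = m :: sort_by_interval_size_alt (p ++ s) := by
  unfold sort_by_interval_size_alt
  rw [List.foldl_append, List.foldl_append, List.foldl_cons]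
  rw [pvInsert_front m (pvKey m) _ (fun y hy => by
    rcases mem_foldl_pvInsert p [] hy with h | h
    · simp at h
    · exact hp y h)]
  exact foldl_pvInsert_skip m s _ hs

lemma pvLoopA_eq_alt : ∀ (fuel : Nat) (l : List (Int × Int)), l.length ≤ fuel →
    pvLoopA fuel l = sort_by_interval_size_alt l := by
  intro fuel
  induction fuel with
  | zero =>
    intro l hl
    rw [List.length_eq_zero_iff.mp (Nat.le_zero.mp hl)]
    rfl
  | succ f ih =>
    intro l hl
    match l with
    | [] => rfl
    | x0 :: xs =>
      rw [pvLoopA]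
      have hfold : (x0 :: xs).foldl pvSelStep x0 = xs.foldl pvSelStep x0 := by
        rw [List.foldl_cons, pvSelStep_eq, if_neg (by rw [pvLt_irrefl]; exact Bool.false_ne_true)]
      set m := xs.foldl pvSelStep x0 with hm
      obtain ⟨p, s, heq, _, hp, hs⟩ := pvFoldMin xs x0
      rw [← hm] at heq hp hs
      have hne : ∀ y ∈ p, y ≠ m := by
        intro y hy he
        have := hp y hy
        rw [he, pvLt_irrefl] at this
        exact Bool.false_ne_true this
      have hrem : PySem.List.remove? (x0 :: xs) m = some (p ++ s) := by
        rw [heq]; exact pvRemove_split p s m hne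
      have hlen : (p ++ s).length ≤ f := by
        have := congrArg List.length heq
        simp only [List.length_cons, List.length_append] at this hl ⊢
        omega
      rw [hfold, hrem]
      simp only [Option.getD_some]
      rw [ih (p ++ s) hlen, heq, pvAlt_split p s m hp hs]

-- ===== VERDICT (by name: the statement is the Claim_ definition above) =====
theorem sort_by_interval_size_spec : Claim_equal_sort_by_interval_size := by
  intro l _
  unfold Spec_sort_by_interval_size sort_by_interval_size
  exact pvLoopA_eq_alt l.length l (Nat.le_refl _)
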